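-- pv_equiv track=rewrite | github.com/sshinohs/coding-test | programmers/문자열_내_마음대로_정렬하기_lv1.py | comparison2
-- ===== SOURCE A (Python) =====
-- def comparison2(a, b, n):
--     if ord(a[n])<ord(b[n]):
--         return True
--     elif ord(a[n])>ord(b[n]):
--         return False
--     else:
--         if n == len(a) - 1:
--             return True
--         elif n == len(b) -1:
--             return False
--         else:
--             return comparison2(a, b, n+1)
-- ===== SOURCE B (Python) =====
-- def comparison2(a, b, n):
--     # closed form: the characters at n decide directly; on a tie the
--     # lexicographic comparison of the suffixes from index n onward decides
--     if a[n] != b[n]: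
--         return a[n] < b[n]
--     return a[n:] <= b[n:]
-- ===== Notes on version B (the rewrite author's own statement) =====
-- stated objective: simpler
-- what changed: B replaces A's recursive per-character four-way branch cascade with a direct comparison of the characters at n and, on a tie, a single closed-form suffix-slice comparison a[n:] <= b[n:].
-- intended difference: For negative n where the suffixes a[n:] and b[n:] are equal but b < a, A accidentally wraps past index -1 and keeps comparing from the start of the strings, returning False (a <= b); B returns True, the intended value since the strings agree from index n onward. — e.g. on comparison2("ba", "aa", -1): A returns false, B returns true
import Mathlib
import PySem

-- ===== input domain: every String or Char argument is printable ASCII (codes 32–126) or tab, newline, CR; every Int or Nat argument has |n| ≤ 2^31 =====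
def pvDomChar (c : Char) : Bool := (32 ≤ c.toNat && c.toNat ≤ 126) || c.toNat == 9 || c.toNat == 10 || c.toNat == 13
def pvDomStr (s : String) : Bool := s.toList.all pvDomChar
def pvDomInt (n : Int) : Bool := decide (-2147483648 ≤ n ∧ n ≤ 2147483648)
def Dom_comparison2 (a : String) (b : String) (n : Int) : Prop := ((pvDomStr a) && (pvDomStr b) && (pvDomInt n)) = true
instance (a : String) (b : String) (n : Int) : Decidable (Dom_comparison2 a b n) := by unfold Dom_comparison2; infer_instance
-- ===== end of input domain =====

-- B replaces A's character-by-character recursion with a direct comparison of the characters at n and, on a tie, the closed-form suffix comparison a[n:] <= b[n:] (objective: simpler); return value only, no side effects.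

-- ===== PORT A =====
-- literal port of A's recursion; the `| _, _ => false` arm is the IndexError case, excluded by Pre_
def comparison2Rec (A : List Char) (B : List Char) (n : Int) : Bool :=
  match hA : PySem.List.pyGet? A n, hB : PySem.List.pyGet? B n with
  | some ca, some cb =>
      if ca.toNat < cb.toNat then true          -- ord(a[n]) < ord(b[n])
      else if cb.toNat < ca.toNat then false    -- ord(a[n]) > ord(b[n])
      else if n = (A.length : Int) - 1 then true
      else if n = (B.length : Int) - 1 then false
      else comparison2Rec A B (n + 1)
  | _, _ => false
termination_by ((A.length : Int) - n).toNat
decreasing_by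
  have h1 : PySem.Raise.InRange A.length n := by
    by_contra h
    rw [← PySem.List.pyGet?_eq_none_iff (xs := A) (i := n)] at h
    simp [h] at hA
  unfold PySem.Raise.InRange at h1
  omega

def comparison2 (a : String) (b : String) (n : Int) : Bool :=
  comparison2Rec a.toList b.toList n

-- ===== PORT B =====
-- Python's built-in string `<=`: code-point lexicographic order (exact on all strings)
def pyLe : List Char → List Char → Bool
  | [], _ => true
  | _ :: _, [] => false
  | x :: xs, y :: ys => if x = y then pyLe xs ys else decide (x.toNat < y.toNat)

-- Source B: the characters at n decide directly; on a tie, a[n:] <= b[n:] decides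
-- (the `| _, _ => false` arm is the IndexError of a[n]/b[n], excluded by Pre_)
def comparison2_alt (a : String) (b : String) (n : Int) : Bool :=
  match PySem.List.pyGet? a.toList n, PySem.List.pyGet? b.toList n with
  | some ca, some cb =>
      if ca ≠ cb then decide (ca.toNat < cb.toNat)
      else pyLe (PySem.List.slice a.toList (some n) none) (PySem.List.slice b.toList (some n) none)
  | _, _ => false

-- ===== PRECONDITION & SPEC =====
-- Pre_ excludes exactly the inputs on which A raises IndexError: the start index n must be
-- a valid Python index into both strings (A then returns before ever indexing out of range).
def Pre_comparison2 (a : String) (b : String) (n : Int) : Prop :=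
  -(min a.toList.length b.toList.length : Int) ≤ n ∧ n < (min a.toList.length b.toList.length : Int)
instance (a : String) (b : String) (n : Int) : Decidable (Pre_comparison2 a b n) := by unfold Pre_comparison2; infer_instance

def pvWitness_comparison2 : String × String × Int := ("ab", "ac", 0)

-- For negative n where the suffixes a[n:] and b[n:] are equal but b < a, A accidentally wraps past
-- index -1 and keeps comparing from the start of the strings, returning False (a <= b); B returns True,
-- the intended value since the strings agree from index n onward.
def D_comparison2 (a : String) (b : String) (n : Int) : Prop :=
  n < 0 ∧ PySem.List.slice a.toList (some n) none = PySem.List.slice b.toList (some n) none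
        ∧ List.Lex (· < ·) b.toList a.toList
instance (a : String) (b : String) (n : Int) : Decidable (D_comparison2 a b n) := by unfold D_comparison2; infer_instance

def Spec_comparison2 (a : String) (b : String) (n : Int) (out : Bool) : Prop := ¬ D_comparison2 a b n → out = comparison2_alt a b n
instance (a : String) (b : String) (n : Int) (out : Bool) : Decidable (Spec_comparison2 a b n out) := by unfold Spec_comparison2; infer_instance

def pvDiffWitness_comparison2 : String × String × Int := ("ba", "aa", -1)
def pvDiffWitnessOut_comparison2 : Bool × Bool := (false, true)

-- ===== CLAIM (what is proved, stated in full; the proofs are below) =====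
def Claim_unchanged_comparison2 : Prop := ∀ (a : String) (b : String) (n : Int), Dom_comparison2 a b n → Pre_comparison2 a b n → Spec_comparison2 a b n (comparison2 a b n)
def Claim_changed_comparison2 : Prop := Dom_comparison2 (pvDiffWitness_comparison2.1) (pvDiffWitness_comparison2.2.1) (pvDiffWitness_comparison2.2.2) ∧ Pre_comparison2 (pvDiffWitness_comparison2.1) (pvDiffWitness_comparison2.2.1) (pvDiffWitness_comparison2.2.2) ∧ D_comparison2 (pvDiffWitness_comparison2.1) (pvDiffWitness_comparison2.2.1) (pvDiffWitness_comparison2.2.2) ∧ comparison2 (pvDiffWitness_comparison2.1) (pvDiffWitness_comparison2.2.1) (pvDiffWitness_comparison2.2.2) = pvDiffWitnessOut_comparison2.1 ∧ comparison2_alt (pvDiffWitness_comparison2.1) (pvDiffWitness_comparison2.2.1) (pvDiffWitness_comparison2.2.2) = pvDiffWitnessOut_comparison2.2 ∧ pvDiffWitnessOut_comparison2.1 ≠ pvDiffWitnessOut_comparison2.2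
def Claim_exact_comparison2 : Prop := ∀ (a : String) (b : String) (n : Int), Dom_comparison2 a b n → Pre_comparison2 a b n → D_comparison2 a b n → comparison2 a b n ≠ comparison2_alt a b n

-- ===== LEMMAS AND PROOFS =====

lemma pyLe_cons (x y : Char) (xs ys : List Char) :
    pyLe (x :: xs) (y :: ys) = if x = y then pyLe xs ys else decide (x.toNat < y.toNat) := rfl

lemma pyLe_refl (X : List Char) : pyLe X X = true := by
  induction X with
  | nil => rfl
  | cons x xs ih => simp [pyLe, ih]

lemma pyLe_eq_false_iff (X Y : List Char) : pyLe X Y = false ↔ List.Lex (· < ·) Y X := by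
  induction X generalizing Y with
  | nil =>
      constructor
      · intro h; exact absurd h (by simp [pyLe])
      · intro h; cases h
  | cons x xs ih =>
      cases Y with
      | nil =>
          constructor
          · intro _; exact List.Lex.nil
          · intro _; rfl
      | cons y ys =>
          by_cases hxy : x = y
          · subst hxy
            rw [pyLe_cons, if_pos rfl, ih]
            constructor
            · exact fun h => List.Lex.cons h
            · intro h
              cases h with
              | cons h => exact h
              | rel h => exact absurd h (lt_irrefl x)
          · rw [pyLe_cons, if_neg hxy]
            constructor
            · intro h
              have hne : x.toNat ≠ y.toNat := fun he => hxy (Char.ext (UInt32.toNat_inj.mp he))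
              have hyx : y.toNat < x.toNat := by
                simp only [decide_eq_false_iff_not] at h; omega
              exact List.Lex.rel (Char.lt_def.mpr hyx)
            · intro h
              cases h with
              | cons h => exact absurd rfl hxy
              | rel h =>
                  have : y.toNat < x.toNat := Char.lt_def.mp h
                  simp only [decide_eq_false_iff_not]; omega

-- A on a nonnegative in-range index is the suffix comparison from there
lemma nonneg_eq (A B : List Char) (n : Int) (h0 : 0 ≤ n)
    (ha : n < (A.length : Int)) (hb : n < (B.length : Int)) :
    comparison2Rec A B n = pyLe (A.drop n.toNat) (B.drop n.toNat) := by
  have hka : n.toNat < A.length := by omega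
  have hkb : n.toNat < B.length := by omega
  have hA : PySem.List.pyGet? A n = some A[n.toNat] :=
    PySem.List.pyGet?_eq_some_getElem A h0 ha
  have hB : PySem.List.pyGet? B n = some B[n.toNat] :=
    PySem.List.pyGet?_eq_some_getElem B h0 hb
  have hdA : A.drop n.toNat = A[n.toNat] :: A.drop (n.toNat + 1) :=
    List.drop_eq_getElem_cons hka
  have hdB : B.drop n.toNat = B[n.toNat] :: B.drop (n.toNat + 1) :=
    List.drop_eq_getElem_cons hkb
  set ca := A[n.toNat] with hca
  set cb := B[n.toNat] with hcb
  by_cases hlt : ca.toNat < cb.toNat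
  · have hne : ca ≠ cb := fun h => by simp [h] at hlt
    have hL : comparison2Rec A B n = true := by
      rw [comparison2Rec, hA, hB]; simp [hlt]
    have hR : pyLe (A.drop n.toNat) (B.drop n.toNat) = true := by
      rw [hdA, hdB, pyLe_cons, if_neg hne]; simp [hlt]
    rw [hL, hR]
  · by_cases hgt : cb.toNat < ca.toNat
    · have hne : ca ≠ cb := fun h => by simp [h] at hgt
      have hL : comparison2Rec A B n = false := by
        rw [comparison2Rec, hA, hB]; simp [hlt, hgt]
      have hR : pyLe (A.drop n.toNat) (B.drop n.toNat) = false := by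
        rw [hdA, hdB, pyLe_cons, if_neg hne]; simp [hlt]
      rw [hL, hR]
    · have htn : ca.toNat = cb.toNat := by omega
      have hceq : ca = cb := Char.ext (UInt32.toNat_inj.mp htn)
      by_cases hla : n = (A.length : Int) - 1
      · have hAe : A.drop (n.toNat + 1) = [] := List.drop_eq_nil_of_le (by omega)
        have hL : comparison2Rec A B n = true := by
          rw [comparison2Rec, hA, hB]; simp [hlt, hgt, hla]
        have hR : pyLe (A.drop n.toNat) (B.drop n.toNat) = true := by
          rw [hdA, hdB, pyLe_cons, if_pos hceq, hAe]; rfl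
        rw [hL, hR]
      · by_cases hlb : n = (B.length : Int) - 1
        · have hBe : B.drop (n.toNat + 1) = [] := List.drop_eq_nil_of_le (by omega)
          have hAne : n.toNat + 1 < A.length := by omega
          have hdA2 : A.drop (n.toNat + 1) = A[n.toNat + 1] :: A.drop (n.toNat + 2) :=
            List.drop_eq_getElem_cons hAne
          have hL : comparison2Rec A B n = false := by
            rw [comparison2Rec, hA, hB]; simp [hlt, hgt, hla]
            exact fun h => absurd hlb h
          have hR : pyLe (A.drop n.toNat) (B.drop n.toNat) = false := by
            rw [hdA, hdB, pyLe_cons, if_pos hceq, hBe, hdA2]; rfl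
          rw [hL, hR]
        · have ih := nonneg_eq A B (n + 1) (by omega) (by omega) (by omega)
          have hcast : (n + 1).toNat = n.toNat + 1 := by omega
          rw [hcast] at ih
          have hL : comparison2Rec A B n = comparison2Rec A B (n + 1) := by
            rw [comparison2Rec, hA, hB]; simp [hlt, hgt, hla, hlb]
          rw [hL, ih, hdA, hdB, pyLe_cons, if_pos hceq]
termination_by ((A.length : Int) - n).toNat
decreasing_by omega

-- A on a negative in-range index: decided by the suffix slices if they differ,
-- otherwise A wraps around and restarts from index 0
lemma neg_eq (A B : List Char) (n : Int) (hn : n < 0)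
    (ha : -(A.length : Int) ≤ n) (hb : -(B.length : Int) ≤ n) :
    comparison2Rec A B n =
      if A.drop (A.length - (-n).toNat) = B.drop (B.length - (-n).toNat)
      then comparison2Rec A B 0
      else pyLe (A.drop (A.length - (-n).toNat)) (B.drop (B.length - (-n).toNat)) := by
  have hka : A.length - (-n).toNat < A.length := by omega
  have hkb : B.length - (-n).toNat < B.length := by omega
  have hnk : n = -(((-n).toNat : Nat) : Int) := by omega
  have hA : PySem.List.pyGet? A n = some A[A.length - (-n).toNat] := by
    have h := PySem.List.pyGet?_neg_natCast A (-n).toNat (by omega) (by omega)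
    rw [← hnk] at h
    rw [h]; exact List.getElem?_eq_getElem hka
  have hB : PySem.List.pyGet? B n = some B[B.length - (-n).toNat] := by
    have h := PySem.List.pyGet?_neg_natCast B (-n).toNat (by omega) (by omega)
    rw [← hnk] at h
    rw [h]; exact List.getElem?_eq_getElem hkb
  have hdA : A.drop (A.length - (-n).toNat)
      = A[A.length - (-n).toNat] :: A.drop (A.length - (-n).toNat + 1) :=
    List.drop_eq_getElem_cons hka
  have hdB : B.drop (B.length - (-n).toNat)
      = B[B.length - (-n).toNat] :: B.drop (B.length - (-n).toNat + 1) :=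
    List.drop_eq_getElem_cons hkb
  set ca := A[A.length - (-n).toNat] with hca
  set cb := B[B.length - (-n).toNat] with hcb
  have hla : ¬ n = (A.length : Int) - 1 := by omega
  have hlb : ¬ n = (B.length : Int) - 1 := by omega
  by_cases hlt : ca.toNat < cb.toNat
  · have hne : ca ≠ cb := fun h => by simp [h] at hlt
    have hdne : ¬ A.drop (A.length - (-n).toNat) = B.drop (B.length - (-n).toNat) := by
      rw [hdA, hdB]; simp [hne]
    have hL : comparison2Rec A B n = true := by
      rw [comparison2Rec, hA, hB]; simp [hlt]
    have hR : pyLe (A.drop (A.length - (-n).toNat)) (B.drop (B.length - (-n).toNat)) = true := by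
      rw [hdA, hdB, pyLe_cons, if_neg hne]; simp [hlt]
    rw [hL, if_neg hdne, hR]
  · by_cases hgt : cb.toNat < ca.toNat
    · have hne : ca ≠ cb := fun h => by simp [h] at hgt
      have hdne : ¬ A.drop (A.length - (-n).toNat) = B.drop (B.length - (-n).toNat) := by
        rw [hdA, hdB]; simp [hne]
      have hL : comparison2Rec A B n = false := by
        rw [comparison2Rec, hA, hB]; simp [hlt, hgt]
      have hR : pyLe (A.drop (A.length - (-n).toNat)) (B.drop (B.length - (-n).toNat)) = false := by
        rw [hdA, hdB, pyLe_cons, if_neg hne]; simp [hlt]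
      rw [hL, if_neg hdne, hR]
    · have htn : ca.toNat = cb.toNat := by omega
      have hceq : ca = cb := Char.ext (UInt32.toNat_inj.mp htn)
      have hL : comparison2Rec A B n = comparison2Rec A B (n + 1) := by
        rw [comparison2Rec, hA, hB]; simp [hlt, hgt, hla, hlb]
      by_cases h1 : n + 1 = 0
      · have hdA1 : A.drop (A.length - (-n).toNat + 1) = [] := List.drop_eq_nil_of_le (by omega)
        have hdB1 : B.drop (B.length - (-n).toNat + 1) = [] := List.drop_eq_nil_of_le (by omega)
        have hdeq : A.drop (A.length - (-n).toNat) = B.drop (B.length - (-n).toNat) := by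
          rw [hdA, hdB, hdA1, hdB1, hceq]
        rw [hL, h1, if_pos hdeq]
      · have ih := neg_eq A B (n + 1) (by omega) (by omega) (by omega)
        have hca1 : A.length - (-(n + 1)).toNat = A.length - (-n).toNat + 1 := by omega
        have hcb1 : B.length - (-(n + 1)).toNat = B.length - (-n).toNat + 1 := by omega
        rw [hca1, hcb1] at ih
        have hcond : (A.drop (A.length - (-n).toNat) = B.drop (B.length - (-n).toNat))
            ↔ (A.drop (A.length - (-n).toNat + 1) = B.drop (B.length - (-n).toNat + 1)) := by
          rw [hdA, hdB]; simp [hceq]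
        rw [hL, ih]
        by_cases hd : A.drop (A.length - (-n).toNat + 1) = B.drop (B.length - (-n).toNat + 1)
        · rw [if_pos hd, if_pos (hcond.mpr hd)]
        · rw [if_neg hd, if_neg (fun h => hd (hcond.mp h)), hdA, hdB, pyLe_cons, if_pos hceq]
termination_by (-n).toNat
decreasing_by omega

-- slices as drops
lemma slice_nonneg (A : List Char) (n : Int) (h0 : 0 ≤ n) :
    PySem.List.slice A (some n) none = A.drop n.toNat :=
  PySem.List.slice_from A h0

lemma slice_neg (A : List Char) (n : Int) (hn : n < 0) (_ha : -(A.length : Int) ≤ n) :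
    PySem.List.slice A (some n) none = A.drop (A.length - (-n).toNat) := by
  have hk : 0 < (-n).toNat := by omega
  have hne : n = -(((-n).toNat : Nat) : Int) := by omega
  have h := PySem.List.slice_from_neg_natCast A (-n).toNat hk
  rw [← hne] at h
  exact h

-- under Pre_, B's fast path agrees with the slice comparison: comparison2_alt is pyLe of the two suffix slices
lemma alt_eq_pyLe (a b : String) (n : Int)
    (h1 : -(min a.toList.length b.toList.length : Int) ≤ n)
    (h2 : n < (min a.toList.length b.toList.length : Int)) :
    comparison2_alt a b n
      = pyLe (PySem.List.slice a.toList (some n) none) (PySem.List.slice b.toList (some n) none) := by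
  obtain ⟨sa, hsa, hta⟩ : ∃ c, PySem.List.pyGet? a.toList n = some c
      ∧ PySem.List.slice a.toList (some n) none = c :: (PySem.List.slice a.toList (some n) none).tail := by
    by_cases h0 : 0 ≤ n
    · have hk : n.toNat < a.toList.length := by omega
      refine ⟨a.toList[n.toNat], PySem.List.pyGet?_eq_some_getElem a.toList h0 (by omega), ?_⟩
      rw [slice_nonneg a.toList n h0, List.drop_eq_getElem_cons hk]; rfl
    · have hn : n < 0 := by omega
      have hk : a.toList.length - (-n).toNat < a.toList.length := by omega
      have hnk : n = -(((-n).toNat : Nat) : Int) := by omega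
      have hg : PySem.List.pyGet? a.toList n = some a.toList[a.toList.length - (-n).toNat] := by
        have h := PySem.List.pyGet?_neg_natCast a.toList (-n).toNat (by omega) (by omega)
        rw [← hnk] at h
        rw [h]; exact List.getElem?_eq_getElem hk
      refine ⟨a.toList[a.toList.length - (-n).toNat], hg, ?_⟩
      rw [slice_neg a.toList n hn (by omega), List.drop_eq_getElem_cons hk]; rfl
  obtain ⟨sb, hsb, htb⟩ : ∃ c, PySem.List.pyGet? b.toList n = some c
      ∧ PySem.List.slice b.toList (some n) none = c :: (PySem.List.slice b.toList (some n) none).tail := by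
    by_cases h0 : 0 ≤ n
    · have hk : n.toNat < b.toList.length := by omega
      refine ⟨b.toList[n.toNat], PySem.List.pyGet?_eq_some_getElem b.toList h0 (by omega), ?_⟩
      rw [slice_nonneg b.toList n h0, List.drop_eq_getElem_cons hk]; rfl
    · have hn : n < 0 := by omega
      have hk : b.toList.length - (-n).toNat < b.toList.length := by omega
      have hnk : n = -(((-n).toNat : Nat) : Int) := by omega
      have hg : PySem.List.pyGet? b.toList n = some b.toList[b.toList.length - (-n).toNat] := by
        have h := PySem.List.pyGet?_neg_natCast b.toList (-n).toNat (by omega) (by omega)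
        rw [← hnk] at h
        rw [h]; exact List.getElem?_eq_getElem hk
      refine ⟨b.toList[b.toList.length - (-n).toNat], hg, ?_⟩
      rw [slice_neg b.toList n hn (by omega), List.drop_eq_getElem_cons hk]; rfl
  unfold comparison2_alt
  rw [hsa, hsb]
  by_cases hne : sa = sb
  · simp [hne]
  · have : pyLe (PySem.List.slice a.toList (some n) none) (PySem.List.slice b.toList (some n) none)
        = decide (sa.toNat < sb.toNat) := by
      rw [hta, htb, pyLe_cons, if_neg hne]
    rw [this]
    simp [hne]

-- ===== VERDICT (by name: the statement is the Claim_ definition above) =====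
theorem comparison2_spec : Claim_unchanged_comparison2 := by
  intro a b n _ hpre hnd
  unfold Pre_comparison2 at hpre
  unfold comparison2
  rw [alt_eq_pyLe a b n hpre.1 hpre.2]
  by_cases h0 : 0 ≤ n
  · rw [slice_nonneg _ _ h0, slice_nonneg _ _ h0,
      nonneg_eq a.toList b.toList n h0 (by omega) (by omega)]
  · have hn : n < 0 := by omega
    rw [slice_neg a.toList n hn (by omega), slice_neg b.toList n hn (by omega),
      neg_eq a.toList b.toList n hn (by omega) (by omega)]
    by_cases hd : a.toList.drop (a.toList.length - (-n).toNat)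
        = b.toList.drop (b.toList.length - (-n).toNat)
    · rw [if_pos hd, hd, pyLe_refl]
      have hlex : ¬ List.Lex (· < ·) b.toList a.toList := by
        intro hlex
        exact hnd ⟨hn, by rw [slice_neg a.toList n hn (by omega),
          slice_neg b.toList n hn (by omega)]; exact hd, hlex⟩
      rw [nonneg_eq a.toList b.toList 0 le_rfl (by omega) (by omega)]
      simp only [Int.toNat_zero, List.drop_zero]
      cases hle : pyLe a.toList b.toList
      · exact absurd ((pyLe_eq_false_iff _ _).mp hle) hlex
      · rfl
    · rw [if_neg hd]

theorem comparison2_changed : Claim_changed_comparison2 := by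
  unfold Claim_changed_comparison2
  refine ⟨by decide, by decide, by decide, ?_, by decide, by decide⟩
  show comparison2 "ba" "aa" (-1) = false
  unfold comparison2
  rw [neg_eq _ _ _ (by decide) (by decide) (by decide), if_pos (by decide),
    nonneg_eq _ _ 0 (by decide) (by decide) (by decide)]
  decide

theorem comparison2_tight : Claim_exact_comparison2 := by
  intro a b n _ hpre hd
  unfold Pre_comparison2 at hpre
  obtain ⟨hn, hsl, hlex⟩ := hd
  unfold comparison2
  rw [alt_eq_pyLe a b n hpre.1 hpre.2, hsl, pyLe_refl]
  rw [neg_eq a.toList b.toList n hn (by omega) (by omega)]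
  have hd' : a.toList.drop (a.toList.length - (-n).toNat)
      = b.toList.drop (b.toList.length - (-n).toNat) := by
    rw [← slice_neg a.toList n hn (by omega), ← slice_neg b.toList n hn (by omega)]
    exact hsl
  rw [if_pos hd', nonneg_eq a.toList b.toList 0 le_rfl (by omega) (by omega)]
  simp only [Int.toNat_zero, List.drop_zero]
  rw [(pyLe_eq_false_iff _ _).mpr hlex]
  decide
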